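-- pv_equiv track=rewrite | github.com/angel-obretenov/anime | utils/ratings.py | calculate_ratings
-- ===== SOURCE A (Python) =====
-- def get_len_range_between(range1, range2, ratings):
--     return len([a for a in ratings if range1 > a >= range2])
--
-- def calculate_ratings(ratings: list):
--     max_rate, min_rate = 10, 1
--     rating_list = {}
--
--     for i in range(max_rate, min_rate, -1):
--         number = get_len_range_between(i, i - 1, ratings)
--         if number is not 0:
--             rating_list[str(i)] = number
--
--     return rating_list
-- ===== SOURCE B (Python) =====
-- def calculate_ratings(ratings: list):
--     counts = {}
--     for a in ratings:
--         if 1 <= a < 10: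
--             counts[a + 1] = counts.get(a + 1, 0) + 1
--     rating_list = {}
--     for i in range(10, 1, -1):
--         c = counts.get(i, 0)
--         if c:
--             rating_list[str(i)] = c
--     return rating_list
-- ===== Notes on version B (the rewrite author's own statement) =====
-- stated objective: faster
-- what changed: A rescans the whole ratings list once per bucket (nine filtered passes); B tabulates bucket frequencies in a single pass over ratings and then emits the non-zero counts for i = 10..2.
import Mathlib
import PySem

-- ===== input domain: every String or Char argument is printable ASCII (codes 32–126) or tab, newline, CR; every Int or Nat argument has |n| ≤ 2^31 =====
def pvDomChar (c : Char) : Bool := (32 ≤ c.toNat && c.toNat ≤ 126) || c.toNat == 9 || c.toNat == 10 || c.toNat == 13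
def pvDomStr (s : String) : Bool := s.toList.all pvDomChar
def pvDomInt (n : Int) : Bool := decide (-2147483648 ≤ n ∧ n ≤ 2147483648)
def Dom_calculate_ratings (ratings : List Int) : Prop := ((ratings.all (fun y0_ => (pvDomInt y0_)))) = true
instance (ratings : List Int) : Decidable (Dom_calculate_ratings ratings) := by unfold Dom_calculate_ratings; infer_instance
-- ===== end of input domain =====

-- ===== PORT A =====
-- B replaces A's nine filtered rescans by one tabulating pass; return-value equivalence only.
def get_len_range_between (range1 range2 : Int) (ratings : List Int) : Int :=
  ((ratings.filter (fun a => range1 > a ∧ a ≥ range2)).length : Int)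

def calculate_ratings (ratings : List Int) : List (String × Int) :=
  ((PySem.List.pyRange 10 1 (-1)).foldl
    (fun rating_list i =>
      let number := get_len_range_between i (i - 1) ratings
      if number ≠ 0 then rating_list.insert (PySem.Int.toStr i) number else rating_list)
    (PySem.Dict.empty : PySem.Dict String Int)).items

-- ===== PORT B =====
def calculate_ratings_alt (ratings : List Int) : List (String × Int) :=
  let counts : PySem.Dict Int Int :=
    ratings.foldl (fun d a => if 1 ≤ a ∧ a < 10 then d.modify (a + 1) 0 (· + 1) else d)
      PySem.Dict.empty
  ((PySem.List.pyRange 10 1 (-1)).foldl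
    (fun rating_list i =>
      let c := counts.getD i 0
      if c ≠ 0 then rating_list.insert (PySem.Int.toStr i) c else rating_list)
    (PySem.Dict.empty : PySem.Dict String Int)).items

-- ===== PRECONDITION & SPEC =====
def Spec_calculate_ratings (ratings : List Int) (out : List (String × Int)) : Prop := out = calculate_ratings_alt ratings
instance (ratings : List Int) (out : List (String × Int)) : Decidable (Spec_calculate_ratings ratings out) := by unfold Spec_calculate_ratings; infer_instance

-- ===== CLAIM (what is proved, stated in full; the proofs are below) =====
def Claim_equal_calculate_ratings : Prop := ∀ (ratings : List Int), Dom_calculate_ratings ratings → Spec_calculate_ratings ratings (calculate_ratings ratings)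

-- ===== LEMMAS AND PROOFS =====

-- For each bucket i in 2..10, B's tabulating loop yields A's rescan count.
lemma counts_getD_loop (i : Int) (h1 : 1 < i) (h2 : i ≤ 10) :
    ∀ (ratings : List Int) (d : PySem.Dict Int Int),
    (ratings.foldl (fun d a => if 1 ≤ a ∧ a < 10 then d.modify (a + 1) 0 (· + 1) else d) d).getD i 0
      = d.getD i 0 + ((ratings.filter (fun a => i > a ∧ a ≥ i - 1)).length : Int)
  | [], d => by simp
  | a :: rest, d => by
    simp only [List.foldl_cons, List.filter_cons]
    by_cases ha : a = i - 1
    · have hc : (1:Int) ≤ a ∧ a < 10 := by omega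
      have hcond : i > a ∧ a ≥ i - 1 := by omega
      rw [if_pos hc, counts_getD_loop i h1 h2 rest]
      have hk : a + 1 = i := by omega
      rw [hk, PySem.Dict.getD_modify_self]
      simp only [hcond, decide_true, List.length_cons, and_self, if_true]
      push_cast
      ring
    · have hcond : ¬ (i > a ∧ a ≥ i - 1) := by omega
      simp only [hcond, decide_false, Bool.false_eq_true, if_false]
      by_cases hc : (1:Int) ≤ a ∧ a < 10
      · rw [if_pos hc, counts_getD_loop i h1 h2 rest,
          PySem.Dict.getD_modify_of_ne]
        omega
      · rw [if_neg hc, counts_getD_loop i h1 h2 rest]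

lemma counts_getD_eq (ratings : List Int) (i : Int) (h1 : 1 < i) (h2 : i ≤ 10) :
    (ratings.foldl (fun d a => if 1 ≤ a ∧ a < 10 then d.modify (a + 1) 0 (· + 1) else d)
      (PySem.Dict.empty : PySem.Dict Int Int)).getD i 0
    = get_len_range_between i (i - 1) ratings := by
  rw [counts_getD_loop i h1 h2 ratings PySem.Dict.empty, PySem.Dict.getD_empty,
    get_len_range_between, zero_add]

-- ===== VERDICT (by name: the statement is the Claim_ definition above) =====
theorem calculate_ratings_spec : Claim_equal_calculate_ratings := by
  intro ratings _
  unfold Spec_calculate_ratings calculate_ratings calculate_ratings_alt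
  congr 1
  apply PySem.List.foldl_congr_mem
  intro acc i hi
  rw [PySem.List.mem_pyRange_neg_one] at hi
  simp only [counts_getD_eq ratings i hi.1 hi.2]
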